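-- pv_equiv track=rewrite | github.com/zhonghuaY/hermes-webui | tests/test_full_width_chat.py | _strip_media_blocks
-- ===== SOURCE A (Python) =====
-- def _strip_media_blocks(css: str) -> str:
--     """Remove the contents of every @media block so we only inspect the
--     selectors that apply at desktop width without overrides."""
--     out = []
--     i = 0
--     while i < len(css):
--         if css.startswith("@media", i):
--             # Find matching brace
--             brace = css.find("{", i)
--             if brace < 0:
--                 break
--             depth = 1
--             j = brace + 1
--             while j < len(css) and depth:
--                 if css[j] == "{":
--                     depth += 1
--                 elif css[j] == "}":
--                     depth -= 1
--                 j += 1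
--             i = j  # skip the entire media block
--             continue
--         out.append(css[i])
--         i += 1
--     return "".join(out)
-- ===== SOURCE B (Python) =====
-- def _strip_media_blocks(css: str) -> str:
--     """Remove the contents of every @media block so we only inspect the
--     selectors that apply at desktop width without overrides."""
--     parts = []
--     i = 0
--     n = len(css)
--     while i < n:
--         pos = css.find("@media", i)
--         if pos < 0:
--             parts.append(css[i:])
--             break
--         parts.append(css[i:pos])
--         brace = css.find("{", pos)
--         if brace < 0:
--             break
--         depth = 1
--         j = brace + 1
--         while j < n and depth:
--             if css[j] == "{":
--                 depth += 1
--             elif css[j] == "}":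
--                 depth -= 1
--             j += 1
--         i = j
--     return "".join(parts)
-- ===== Notes on version B (the rewrite author's own statement) =====
-- stated objective: faster
-- what changed: Replaced A's char-by-char outer loop (a startswith test and a one-char append at every index) with a find-driven segment loop that jumps straight to the next '@media' occurrence and appends whole slices; the brace-depth scan that skips a block is kept.
import Mathlib
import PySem

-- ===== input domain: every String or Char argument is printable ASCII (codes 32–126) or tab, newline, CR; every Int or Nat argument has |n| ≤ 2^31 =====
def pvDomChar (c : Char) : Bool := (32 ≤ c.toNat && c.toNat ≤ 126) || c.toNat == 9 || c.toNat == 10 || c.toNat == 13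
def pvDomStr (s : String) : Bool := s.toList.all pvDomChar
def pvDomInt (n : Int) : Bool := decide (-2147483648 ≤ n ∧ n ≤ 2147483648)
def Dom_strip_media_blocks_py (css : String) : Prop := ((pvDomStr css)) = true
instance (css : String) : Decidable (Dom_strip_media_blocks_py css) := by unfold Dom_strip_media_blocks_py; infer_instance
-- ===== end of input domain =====

-- B replaces A's char-by-char outer loop (startswith test at every index, one-char appends)
-- with a find-driven segment loop that appends whole slices between @media blocks; return
-- values are identical, no side effects involved.

-- Shared helpers (both Pythons run the same brace-depth scan and 'find' primitives):
-- css.find('{', i) restricted to the suffix starting at i: drop through the first '{'.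
def findBraceA : List Char → Option (List Char)
  | [] => none
  | c :: rest => if c = '{' then some rest else findBraceA rest

-- the inner 'while j < len(css) and depth' loop, on the suffix starting at j
def skipDepth (d : Int) (cs : List Char) : List Char :=
  if d = 0 then cs else
  match cs with
  | [] => []
  | c :: rest => skipDepth (if c = '{' then d + 1 else if c = '}' then d - 1 else d) rest

theorem findBraceA_length {cs after : List Char} (h : findBraceA cs = some after) :
    after.length < cs.length := by
  induction cs with
  | nil => simp [findBraceA] at h
  | cons c rest ih =>
    simp only [findBraceA] at h
    split at h
    · cases h; simp
    · have := ih h; simp; omega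

theorem skipDepth_length (d : Int) (cs : List Char) : (skipDepth d cs).length ≤ cs.length := by
  induction cs generalizing d with
  | nil => rw [skipDepth]; split <;> simp
  | cons c rest ih =>
    rw [skipDepth]; split
    · exact le_refl _
    · exact le_trans (ih _) (by simp)

-- ===== PORT A =====
-- A's while-loop over index i, transcribed as structural recursion on the suffix css[i:].
def scanA (cs : List Char) : List Char :=
  match cs with
  | [] => []
  | c :: rest =>
    if "@media".toList.isPrefixOf (c :: rest) then
      match h : findBraceA (c :: rest) with
      | none => []                      -- brace < 0: break (discard the rest)
      | some after => scanA (skipDepth 1 after)   -- i = j; continue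
    else
      c :: scanA rest                   -- out.append(css[i]); i += 1
termination_by cs.length
decreasing_by
  · have h1 := findBraceA_length h
    have h2 := skipDepth_length 1 after
    simp at h1 ⊢; omega
  · simp

def strip_media_blocks_py (css : String) : String := String.ofList (scanA css.toList)

-- ===== PORT B =====
-- css.find('@media', i) on the suffix: split it at the first occurrence of "@media".
def findMediaB : List Char → Option (List Char × List Char)
  | [] => none
  | c :: rest =>
    if "@media".toList.isPrefixOf (c :: rest) then some ([], c :: rest)
    else
      match findMediaB rest with
      | none => none
      | some (pre, post) => some (c :: pre, post)

theorem findMediaB_length {cs pre post : List Char}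
    (h : findMediaB cs = some (pre, post)) : post.length ≤ cs.length := by
  induction cs generalizing pre with
  | nil => simp [findMediaB] at h
  | cons c rest ih =>
    simp only [findMediaB] at h
    split at h
    · cases h; exact le_refl _
    · cases h2 : findMediaB rest with
      | none => rw [h2] at h; cases h
      | some p =>
        rw [h2] at h; cases h
        exact le_trans (ih h2) (by simp)

-- B's segment loop: emit whole slices between @media blocks.
def scanB (cs : List Char) : List Char :=
  match h : findMediaB cs with
  | none => cs                                  -- pos < 0: append css[i:] and stop
  | some (pre, post) =>
    match h2 : findBraceA post with
    | none => pre                               -- brace < 0: break (discard the rest)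
    | some after => pre ++ scanB (skipDepth 1 after)
termination_by cs.length
decreasing_by
  have h1 := findMediaB_length h
  have h3 := findBraceA_length h2
  have h4 := skipDepth_length 1 after
  omega

def strip_media_blocks_py_alt (css : String) : String := String.ofList (scanB css.toList)

-- ===== PRECONDITION & SPEC =====
def Spec_strip_media_blocks_py (css : String) (out : String) : Prop := out = strip_media_blocks_py_alt css
instance (css : String) (out : String) : Decidable (Spec_strip_media_blocks_py css out) := by unfold Spec_strip_media_blocks_py; infer_instance

-- ===== CLAIM (what is proved, stated in full; the proofs are below) =====
def Claim_equal_strip_media_blocks_py : Prop := ∀ (css : String), Dom_strip_media_blocks_py css → Spec_strip_media_blocks_py css (strip_media_blocks_py css)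

-- ===== LEMMAS AND PROOFS =====

theorem scanB_eq_of_none {cs : List Char} (h : findMediaB cs = none) : scanB cs = cs := by
  rw [scanB.eq_def]; split
  · rfl
  · rename_i pre' post' h'; rw [h] at h'; cases h'

theorem scanB_some_none {cs pre post : List Char} (h : findMediaB cs = some (pre, post))
    (h2 : findBraceA post = none) : scanB cs = pre := by
  rw [scanB.eq_def]
  split
  · rename_i h'; rw [h] at h'; cases h'
  · rename_i pre' post' h'
    rw [h] at h'; cases h'
    split
    · rfl
    · rename_i after h3; rw [h2] at h3; cases h3

theorem scanB_some_some {cs pre post after : List Char} (h : findMediaB cs = some (pre, post))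
    (h2 : findBraceA post = some after) : scanB cs = pre ++ scanB (skipDepth 1 after) := by
  rw [scanB.eq_def]
  split
  · rename_i h'; rw [h] at h'; cases h'
  · rename_i pre' post' h'
    rw [h] at h'; cases h'
    split
    · rename_i h3; rw [h2] at h3; cases h3
    · rename_i after' h3; rw [h2] at h3; cases h3; rfl

theorem scanA_eq_scanB : ∀ (n : Nat) (cs : List Char), cs.length ≤ n → scanA cs = scanB cs := by
  intro n
  induction n with
  | zero =>
    intro cs h
    have : cs = [] := List.eq_nil_of_length_eq_zero (Nat.le_zero.mp h)
    subst this
    rw [scanA.eq_def, scanB_eq_of_none (by simp [findMediaB])]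
  | succ n ih =>
    intro cs hlen
    match cs with
    | [] => rw [scanA.eq_def, scanB_eq_of_none (by simp [findMediaB])]
    | c :: rest =>
      rw [scanA.eq_def]
      by_cases hp : "@media".toList.isPrefixOf (c :: rest)
      · simp only [hp, if_true]
        have hm : findMediaB (c :: rest) = some ([], c :: rest) := by
          simp only [findMediaB, hp, if_true]
        cases h2 : findBraceA (c :: rest) with
        | none => rw [scanB_some_none hm h2]
        | some after =>
          rw [scanB_some_some hm h2, List.nil_append]
          have h1 := findBraceA_length h2
          have h4 := skipDepth_length 1 after
          exact ih _ (by simp at hlen h1 ⊢; omega)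
      · simp only [hp, Bool.false_eq_true, if_false]
        have hrest : scanA rest = scanB rest := ih rest (by simp at hlen; omega)
        rw [hrest]
        cases hm : findMediaB rest with
        | none =>
          rw [scanB_eq_of_none hm, scanB_eq_of_none (by simp only [findMediaB, hp, Bool.false_eq_true, if_false, hm])]
        | some p =>
          obtain ⟨pre, post⟩ := p
          have hm' : findMediaB (c :: rest) = some (c :: pre, post) := by
            simp only [findMediaB, hp, Bool.false_eq_true, if_false, hm]
          cases h2 : findBraceA post with
          | none => rw [scanB_some_none hm h2, scanB_some_none hm' h2]
          | some after => rw [scanB_some_some hm h2, scanB_some_some hm' h2, List.cons_append]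

-- ===== VERDICT (by name: the statement is the Claim_ definition above) =====
theorem strip_media_blocks_py_spec : Claim_equal_strip_media_blocks_py := by
  intro css _
  unfold Spec_strip_media_blocks_py strip_media_blocks_py strip_media_blocks_py_alt
  rw [scanA_eq_scanB css.toList.length css.toList (le_refl _)]
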